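-- pv_equiv track=rewrite | github.com/realgs/skryptowe20 | lab5/sales_api_handler.py | __check_date_format
-- ===== SOURCE A (Python) =====
-- def __check_date_format(date):
--     if len(date) == 10:
--         for i in range(len(date)):
--             if not (i == 4 or i == 7):
--                 if not date[i].isnumeric():
--                     return False
--     else:
--         return False
--     return True
-- ===== SOURCE B (Python) =====
-- def __check_date_format(date):
--     if len(date) != 10:
--         return False
--     return date[0:4].isnumeric() and date[5:7].isnumeric() and date[8:10].isnumeric()
-- ===== Notes on version B (the rewrite author's own statement) =====
-- stated objective: idiomatic
-- what changed: Replaces the index-skipping per-character loop with an early length guard plus three contiguous slice .isnumeric() checks (positions 4 and 7 still unchecked).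
import Mathlib
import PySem

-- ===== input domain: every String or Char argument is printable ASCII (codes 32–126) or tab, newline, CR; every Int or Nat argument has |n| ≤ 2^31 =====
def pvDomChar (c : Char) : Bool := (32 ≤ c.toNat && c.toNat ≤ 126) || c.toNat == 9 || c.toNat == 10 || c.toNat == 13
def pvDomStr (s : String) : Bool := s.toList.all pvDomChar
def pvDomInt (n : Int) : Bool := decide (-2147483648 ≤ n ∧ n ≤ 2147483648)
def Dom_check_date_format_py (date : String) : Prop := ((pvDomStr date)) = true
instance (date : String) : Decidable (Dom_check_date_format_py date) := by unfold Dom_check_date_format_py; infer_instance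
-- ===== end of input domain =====

-- B replaces A's index-skipping per-character loop by a length guard plus three contiguous slice digit-group checks (idiomatic decomposition; same cost).


-- ===== PORT A =====
-- the 'for i in range(len(date))' loop, walking the characters with their index
-- (str.isnumeric ported as PySem.Chars.isdigit: exact on the ASCII domain)
def pvALoop : Nat → List Char → Bool
  | _, [] => true
  | i, c :: rest =>
    if ¬(i = 4 ∨ i = 7) then
      if ¬(PySem.Chars.isdigit c) then false
      else pvALoop (i + 1) rest
    else pvALoop (i + 1) rest

def check_date_format_py (date : String) : Bool :=
  if date.toList.length = 10 then pvALoop 0 date.toList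
  else false

-- ===== PORT B =====
-- B: length guard, then date[0:4] / date[5:7] / date[8:10] must each be all-numeric
-- (str.isnumeric of a slice = nonempty ∧ all digits, via PySem.Chars.strIsdigit: exact on ASCII)
def check_date_format_py_alt (date : String) : Bool :=
  let cs := date.toList
  if cs.length ≠ 10 then false
  else
    PySem.Chars.strIsdigit (PySem.List.slice cs (some 0) (some 4)) &&
    PySem.Chars.strIsdigit (PySem.List.slice cs (some 5) (some 7)) &&
    PySem.Chars.strIsdigit (PySem.List.slice cs (some 8) (some 10))

-- ===== PRECONDITION & SPEC =====
def Spec_check_date_format_py (date : String) (out : Bool) : Prop := out = check_date_format_py_alt date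
instance (date : String) (out : Bool) : Decidable (Spec_check_date_format_py date out) := by unfold Spec_check_date_format_py; infer_instance

-- ===== CLAIM (what is proved, stated in full; the proofs are below) =====
def Claim_equal_check_date_format_py : Prop := ∀ (date : String), Dom_check_date_format_py date → Spec_check_date_format_py date (check_date_format_py date)

-- ===== LEMMAS AND PROOFS =====

theorem pv_core (cs : List Char) :
    (if cs.length = 10 then pvALoop 0 cs else false) =
    (if cs.length ≠ 10 then false
     else
       PySem.Chars.strIsdigit (PySem.List.slice cs (some 0) (some 4)) &&
       PySem.Chars.strIsdigit (PySem.List.slice cs (some 5) (some 7)) &&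
       PySem.Chars.strIsdigit (PySem.List.slice cs (some 8) (some 10))) := by
  by_cases h : cs.length = 10
  · match cs, h with
    | [a0,a1,a2,a3,a4,a5,a6,a7,a8,a9], _ =>
      simp [pvALoop, PySem.Chars.strIsdigit, PySem.List.slice, PySem.List.clampIdx]
      cases PySem.Chars.isdigit a0 <;> cases PySem.Chars.isdigit a1 <;>
        cases PySem.Chars.isdigit a2 <;> cases PySem.Chars.isdigit a3 <;>
        cases PySem.Chars.isdigit a5 <;> cases PySem.Chars.isdigit a6 <;>
        cases PySem.Chars.isdigit a8 <;> cases PySem.Chars.isdigit a9 <;> simp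
  · simp [h]

-- ===== VERDICT (by name: the statement is the Claim_ definition above) =====
theorem check_date_format_py_spec : Claim_equal_check_date_format_py := by
  intro date _
  unfold Spec_check_date_format_py check_date_format_py check_date_format_py_alt
  exact pv_core date.toList
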